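-- pv_equiv track=rewrite | github.com/moshe742/AOC-2023 | p1.py | find_start_end_digits
-- ===== SOURCE A (Python) =====
-- def find_start_end_digits(line):
--     start = 0
--     end = len(line) - 1
--     while not line[start].isdigit():
--         start += 1
--     while not line[end].isdigit():
--         end -= 1
--     return start, end
-- ===== SOURCE B (Python) =====
-- def find_start_end_digits(line):
--     idx = [i for i, c in enumerate(line) if c.isdigit()]
--     return idx[0], idx[-1]
-- ===== Notes on version B (the rewrite author's own statement) =====
-- stated objective: simpler
-- what changed: Replaces the two one-sided early-stopping while loops (with Python's negative-index wraparound in the backward scan) by a single forward pass that materialises the list of all digit positions and reads its two endpoints.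
import Mathlib
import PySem

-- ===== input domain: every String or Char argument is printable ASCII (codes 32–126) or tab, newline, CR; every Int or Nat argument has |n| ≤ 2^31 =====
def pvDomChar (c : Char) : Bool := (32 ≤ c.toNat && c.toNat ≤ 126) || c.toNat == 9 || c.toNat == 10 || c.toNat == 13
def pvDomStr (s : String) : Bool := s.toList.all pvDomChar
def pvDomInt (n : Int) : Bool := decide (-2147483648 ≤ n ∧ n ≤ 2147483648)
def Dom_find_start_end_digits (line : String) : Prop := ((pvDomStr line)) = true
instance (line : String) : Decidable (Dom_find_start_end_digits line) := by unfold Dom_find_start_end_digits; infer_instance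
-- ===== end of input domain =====

-- B replaces A's two one-sided early-stopping scans by one full forward pass that
-- collects all digit positions and reads the first and last; objective: simpler.

-- ===== PORT A =====
-- Python's `while not line[start].isdigit(): start += 1`; out-of-range access is
-- IndexError (excluded by Pre_); fuel = enough steps, never exhausted inside Pre_.
def aFwd (cs : List Char) : Nat → Nat → Nat
  | 0, s => s
  | f + 1, s =>
    match cs[s]? with
    | some c => if PySem.Chars.isdigit c then s else aFwd cs f (s + 1)
    | none => s

-- Python's `while not line[end].isdigit(): end -= 1`; inside Pre_ the scan stops at
-- a digit before the index could go below 0 (where Python would wrap negatively).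
def aBwd (cs : List Char) : Nat → Nat → Nat
  | 0, e => e
  | f + 1, e =>
    match cs[e]? with
    | some c => if PySem.Chars.isdigit c then e else aBwd cs f (e - 1)
    | none => e

def find_start_end_digits (line : String) : Int × Int :=
  let cs := line.toList
  ((aFwd cs cs.length 0 : Int), (aBwd cs cs.length (cs.length - 1) : Int))

-- ===== PORT B =====
def find_start_end_digits_alt (line : String) : Int × Int :=
  let cs := line.toList
  let idx := ((PySem.List.enumerate cs).filter (fun p => PySem.Chars.isdigit p.2)).map (fun p => p.1)
  ((PySem.List.pyGet? idx 0).getD 0, (PySem.List.pyGet? idx (-1)).getD 0)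

-- ===== PRECONDITION & SPEC =====
-- Pre_ : the line contains at least one digit; otherwise Python A raises IndexError
-- (the forward scan runs off the end of the string), and B raises IndexError too.
def Pre_find_start_end_digits (line : String) : Prop :=
  line.toList.any PySem.Chars.isdigit = true
instance (line : String) : Decidable (Pre_find_start_end_digits line) := by
  unfold Pre_find_start_end_digits; infer_instance

def pvWitness_find_start_end_digits : String := "a1b2c"

def Spec_find_start_end_digits (line : String) (out : Int × Int) : Prop := out = find_start_end_digits_alt line
instance (line : String) (out : Int × Int) : Decidable (Spec_find_start_end_digits line out) := by unfold Spec_find_start_end_digits; infer_instance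

-- ===== CLAIM (what is proved, stated in full; the proofs are below) =====
def Claim_equal_find_start_end_digits : Prop := ∀ (line : String), Dom_find_start_end_digits line → Pre_find_start_end_digits line → Spec_find_start_end_digits line (find_start_end_digits line)

-- ===== LEMMAS AND PROOFS =====

-- index of the last digit in cs (meaningful when cs contains a digit)
def lastDigitIdx : List Char → Nat
  | [] => 0
  | _ :: cs => if cs.any PySem.Chars.isdigit then lastDigitIdx cs + 1 else 0

theorem lastDigitIdx_lt_length (cs : List Char)
    (h : cs.any PySem.Chars.isdigit = true) : lastDigitIdx cs < cs.length := by
  induction cs with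
  | nil => simp at h
  | cons c cs ih =>
    simp only [lastDigitIdx]
    by_cases hc : cs.any PySem.Chars.isdigit = true
    · simp [hc, Nat.succ_lt_succ (ih hc)]
    · simp [hc]

theorem lastDigitIdx_isdigit (cs : List Char)
    (h : cs.any PySem.Chars.isdigit = true) :
    PySem.Chars.isdigit (cs.getD (lastDigitIdx cs) ' ') = true := by
  induction cs with
  | nil => simp at h
  | cons c cs ih =>
    simp only [lastDigitIdx]
    by_cases hc : cs.any PySem.Chars.isdigit = true
    · simpa [hc] using ih hc
    · simp only [List.any_cons, Bool.or_eq_true] at h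
      rcases h with h | h
      · simpa [hc] using h
      · exact absurd h hc

theorem lastDigitIdx_spec_gt (cs : List Char)
    (h : cs.any PySem.Chars.isdigit = true) (j : Nat)
    (hgt : lastDigitIdx cs < j) (hj : j < cs.length) :
    PySem.Chars.isdigit (cs.getD j ' ') = false := by
  induction cs generalizing j with
  | nil => simp at h
  | cons c cs ih =>
    simp only [lastDigitIdx] at hgt
    by_cases hc : cs.any PySem.Chars.isdigit = true
    · simp only [hc, if_true] at hgt
      cases j with
      | zero => omega
      | succ j => simpa using ih hc j (by omega) (by simpa using hj)
    · simp only [hc] at hgt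
      cases j with
      | zero => omega
      | succ j =>
        simp only [List.getD_cons_succ]
        have : ∀ x ∈ cs, PySem.Chars.isdigit x = false := by
          intro x hx
          by_contra hx'
          exact hc (List.any_eq_true.mpr ⟨x, hx, by simpa using hx'⟩)
        have hj' : j < cs.length := by simpa using hj
        exact this _ (by
          rw [List.getD_eq_getElem cs ' ' hj']
          exact cs.getElem_mem hj')

-- the forward scan reaches the first digit
theorem aFwd_eq (cs : List Char) (fuel s : Nat)
    (hfuel : cs.length ≤ s + fuel)
    (hex : ∃ j, s ≤ j ∧ j < cs.length ∧ PySem.Chars.isdigit (cs.getD j ' ') = true) :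
    aFwd cs fuel s = s + List.findIdx PySem.Chars.isdigit (cs.drop s) := by
  induction fuel generalizing s with
  | zero => obtain ⟨j, h1, h2, _⟩ := hex; omega
  | succ f ih =>
    obtain ⟨j, h1, h2, h3⟩ := hex
    have hs : s < cs.length := by omega
    have hdrop : cs.drop s = cs[s] :: cs.drop (s + 1) := List.drop_eq_getElem_cons hs
    simp only [aFwd, cs.getElem?_eq_getElem hs]
    by_cases hd : PySem.Chars.isdigit cs[s] = true
    · rw [if_pos hd, hdrop, List.findIdx_cons]
      simp [hd]
    · have hd' : PySem.Chars.isdigit cs[s] = false := by simpa using hd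
      rw [hdrop, List.findIdx_cons]
      simp only [hd', Bool.false_eq_true, if_false, cond_false]
      have hjs : s ≠ j := by
        intro he; subst he
        rw [List.getD_eq_getElem cs ' ' hs] at h3
        simp [h3] at hd'
      rw [ih (s + 1) (by omega) ⟨j, by omega, h2, h3⟩]
      omega

-- the backward scan reaches the last digit
theorem aBwd_eq (cs : List Char) (fuel e : Nat)
    (hany : cs.any PySem.Chars.isdigit = true)
    (hle : lastDigitIdx cs ≤ e) (hlt : e < cs.length) (hfuel : e < fuel) :
    aBwd cs fuel e = lastDigitIdx cs := by
  induction fuel generalizing e with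
  | zero => omega
  | succ f ih =>
    simp only [aBwd, cs.getElem?_eq_getElem hlt]
    rcases Nat.eq_or_lt_of_le hle with he | he
    · subst he
      have hd : PySem.Chars.isdigit cs[lastDigitIdx cs] = true := by
        have h2 := lastDigitIdx_isdigit cs hany
        rwa [List.getD_eq_getElem cs ' ' hlt] at h2
      simp [hd]
    · have hfalse := lastDigitIdx_spec_gt cs hany e he hlt
      rw [List.getD_eq_getElem cs ' ' hlt] at hfalse
      simp only [hfalse, Bool.false_eq_true, if_false]
      exact ih (e - 1) (by omega) (by omega) (by omega)

-- B's index list: head is the first digit position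
theorem b_head (cs : List Char) (s : Int)
    (hany : cs.any PySem.Chars.isdigit = true) :
    (((PySem.List.enumerate cs s).filter (fun p => PySem.Chars.isdigit p.2)).map (fun p => p.1)).head?
      = some (s + (List.findIdx PySem.Chars.isdigit cs : Int)) := by
  induction cs generalizing s with
  | nil => simp at hany
  | cons c cs ih =>
    simp only [PySem.List.enumerate_cons, List.filter_cons]
    by_cases hd : PySem.Chars.isdigit c = true
    · simp [hd, List.findIdx_cons]
    · simp only [hd, Bool.false_eq_true, if_false]
      have hany' : cs.any PySem.Chars.isdigit = true := by
        simpa [hd] using hany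
      rw [ih (s + 1) hany', List.findIdx_cons]
      simp only [hd, Bool.cond_eq_ite, Bool.false_eq_true, if_false]
      congr 1
      push_cast
      ring

-- B's index list is empty iff the string has no digit
theorem b_filter_nil (cs : List Char) (s : Int)
    (hnone : cs.any PySem.Chars.isdigit = false) :
    (PySem.List.enumerate cs s).filter (fun p => PySem.Chars.isdigit p.2) = [] := by
  induction cs generalizing s with
  | nil => simp [PySem.List.enumerate]
  | cons c cs ih =>
    simp only [List.any_cons, Bool.or_eq_false_iff] at hnone
    simp [PySem.List.enumerate_cons, hnone.1, ih (s+1) hnone.2]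

theorem getLast?_cons_of_ne {α : Type} (a : α) (l : List α) (h : l ≠ []) :
    (a :: l).getLast? = l.getLast? := by
  cases l with
  | nil => exact absurd rfl h
  | cons b l => simp [List.getLast?_cons_cons]

-- B's index list: last element is the last digit position
theorem b_last (cs : List Char) (s : Int)
    (hany : cs.any PySem.Chars.isdigit = true) :
    (((PySem.List.enumerate cs s).filter (fun p => PySem.Chars.isdigit p.2)).map (fun p => p.1)).getLast?
      = some (s + (lastDigitIdx cs : Int)) := by
  induction cs generalizing s with
  | nil => simp at hany
  | cons c cs ih =>
    simp only [PySem.List.enumerate_cons, List.filter_cons, lastDigitIdx]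
    by_cases hc : cs.any PySem.Chars.isdigit = true
    · have ih' := ih (s + 1) hc
      have hrest : (((PySem.List.enumerate cs (s + 1)).filter (fun p => PySem.Chars.isdigit p.2)).map (fun p => p.1)) ≠ [] := by
        intro h0; rw [h0] at ih'; simp at ih'
      by_cases hd : PySem.Chars.isdigit c = true
      · rw [if_pos hd, if_pos hc, List.map_cons, getLast?_cons_of_ne _ _ hrest, ih']
        congr 1
        push_cast
        ring
      · simp only [hd, Bool.false_eq_true, if_false, hc, if_true]
        rw [ih']
        congr 1
        push_cast
        ring
    · have hd : PySem.Chars.isdigit c = true := by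
        simpa [hc] using hany
      have := b_filter_nil cs (s + 1) (by simpa using hc)
      simp [hd, hc, this]

-- pyGet? at 0 and -1 on a nonempty list
theorem pyGet?_zero {α : Type} (xs : List α) (h : xs ≠ []) :
    PySem.List.pyGet? xs 0 = xs.head? := by
  have : 0 < xs.length := List.length_pos_iff.mpr h
  cases xs with
  | nil => simp at h
  | cons a l => simp [PySem.List.pyGet?, PySem.List.pyIdx?]

theorem pyGet?_neg_one {α : Type} (xs : List α) (h : xs ≠ []) :
    PySem.List.pyGet? xs (-1) = xs.getLast? := by
  have hpos : 0 < xs.length := List.length_pos_iff.mpr h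
  simp only [PySem.List.pyGet?, PySem.List.pyIdx?]
  rw [if_neg (by omega), if_pos (by omega)]
  simp only [Option.bind_some]
  rw [List.getLast?_eq_getElem?]
  norm_num

-- ===== VERDICT (by name: the statement is the Claim_ definition above) =====
theorem find_start_end_digits_spec : Claim_equal_find_start_end_digits := by
  intro line _ hpre
  have hany : line.toList.any PySem.Chars.isdigit = true := hpre
  obtain ⟨x, hx, hdx⟩ := List.any_eq_true.mp hany
  obtain ⟨j, hj, hje⟩ := List.mem_iff_getElem.mp hx
  have hhead := b_head line.toList 0 hany
  have hlastl := b_last line.toList 0 hany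
  have hne : (((PySem.List.enumerate line.toList 0).filter (fun p => PySem.Chars.isdigit p.2)).map (fun p => p.1)) ≠ [] := by
    intro h0; rw [h0] at hhead; simp at hhead
  have hfwd : aFwd line.toList line.toList.length 0 = List.findIdx PySem.Chars.isdigit line.toList := by
    have := aFwd_eq line.toList line.toList.length 0 (by omega)
      ⟨j, Nat.zero_le _, hj, by rw [List.getD_eq_getElem line.toList ' ' hj, hje]; simpa using hdx⟩
    simpa using this
  have hbwd : aBwd line.toList line.toList.length (line.toList.length - 1) = lastDigitIdx line.toList := by
    exact aBwd_eq line.toList line.toList.length (line.toList.length - 1) hany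
      (by have := lastDigitIdx_lt_length line.toList hany; omega)
      (by have := lastDigitIdx_lt_length line.toList hany; omega)
      (by have := lastDigitIdx_lt_length line.toList hany; omega)
  unfold Spec_find_start_end_digits find_start_end_digits find_start_end_digits_alt
  simp only [pyGet?_zero _ hne, pyGet?_neg_one _ hne, hhead, hlastl, hfwd, hbwd,
    Option.getD_some, zero_add]
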